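-- pv_equiv track=rewrite | github.com/irenechiam/FoCdle | FoCdle.py | set_colors
-- ===== SOURCE A (Python) =====
-- def set_colors(secret, guess):
--     '''
--     Compares the latest `guess` equation against the unknown `secret` one.
--     Returns a list of three-item tuples, one tuple for each character position
--     in the two equations:
--         -- a position number within the `guess`, counting from zero;
--         -- the character at that position of `guess`;
--         -- one of "green", "yellow", or "grey", to indicate the status of
--            the `guess` at that position, relative to `secret`.
--     The return list is sorted by position.
--     '''
--     green_list = []
--     y_g_list = []  # For yellows and greys only
--
--     # Seperating the greens with the yellows and greys
--     for index in range(len(guess)):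
--         g_current = guess[index]
--         s_current = secret[index]
--         if g_current == s_current:
--             green_list.append((index, g_current, GREEN))
--         else:
--             y_g_list.append((index, g_current))
--
--     for i, char in y_g_list:
--         # Creating a dictionary of the char and number of green char
--         # Or the number of color-assigned char
--         secret_count = {}
--         for idx, chara, colour in green_list:
--             if chara in secret_count:
--                 secret_count[chara] += 1
--             else:
--                 secret_count[chara] = 1
--
--         # To check whether the color for char in y_g_list be yellow or grey
--         if char in secret and char in secret_count:
--             remaining = secret.count(char) - secret_count[char]
--             if remaining == 0:
--                 green_list.append((i, char, GREYY))
--             elif remaining < 0: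
--                 green_list.append((i, char, GREYY))
--             else:
--                 green_list.append((i, char, YELLO))
--
--         elif char in secret and char != secret[i]:
--             green_list.append((i, char, YELLO))
--
--         else:
--             green_list.append((i, char, GREYY))
--
--     return sorted(green_list)
--
-- GREEN = "green"
--
-- YELLO = "yellow"
--
-- GREYY = "grey"
-- ===== SOURCE B (Python) =====
-- def set_colors(secret, guess):
--     # Count secret's characters once, consume one copy per green, then one per
--     # processed non-green position (exhausted counts stay <= 0), emitting the
--     # result directly in position order -- no per-position recount, no sort.
--     available = {}
--     for ch in secret:
--         available[ch] = available.get(ch, 0) + 1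
--     for i in range(len(guess)):
--         if guess[i] == secret[i]:
--             available[guess[i]] = available.get(guess[i], 0) - 1
--     result = []
--     for i in range(len(guess)):
--         ch = guess[i]
--         if ch == secret[i]:
--             result.append((i, ch, "green"))
--         else:
--             a = available.get(ch, 0)
--             available[ch] = a - 1
--             result.append((i, ch, "yellow" if a > 0 else "grey"))
--     return result
-- ===== Notes on version B (the rewrite author's own statement) =====
-- stated objective: faster
-- what changed: Replaces A's rebuild-a-count-dictionary-per-non-green-position-plus-final-sort with one secret character count built once, decremented per assignment, emitting the result directly in position order with no sort.
import Mathlib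
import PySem

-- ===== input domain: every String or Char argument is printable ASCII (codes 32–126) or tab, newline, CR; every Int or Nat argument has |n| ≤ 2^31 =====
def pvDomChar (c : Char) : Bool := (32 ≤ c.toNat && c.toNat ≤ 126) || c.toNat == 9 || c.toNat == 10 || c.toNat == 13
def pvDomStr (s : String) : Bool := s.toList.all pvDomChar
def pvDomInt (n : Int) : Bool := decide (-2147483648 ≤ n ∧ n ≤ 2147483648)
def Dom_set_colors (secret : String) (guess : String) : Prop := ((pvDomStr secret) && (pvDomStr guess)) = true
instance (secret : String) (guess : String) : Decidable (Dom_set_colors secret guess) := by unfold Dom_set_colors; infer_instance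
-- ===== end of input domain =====

-- B replaces A's per-position recount-dictionary plus final sort with one character
-- count built once and consumed left to right, emitting the result already in order.


-- ===== PORT A =====
-- Characters are carried as Char (Python's length-1 strings): for a 1-char string,
-- 'char in secret' is char membership and secret.count(char) is the char count.
def set_colors (secret : String) (guess : String) : List (Int × String × String) :=
  let s := secret.toList
  let g := guess.toList
  -- first loop: separate the greens from the yellows/greys
  let p := (List.range g.length).foldl
    (fun (st : List (Int × Char × String) × List (Int × Char)) index =>
      let g_current := g.getD index ' '
      let s_current := s.getD index ' '   -- index ≥ len(secret) is Python's IndexError, excluded by Pre_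
      if g_current == s_current then (st.1 ++ [((index : Int), g_current, "green")], st.2)
      else (st.1, st.2 ++ [((index : Int), g_current)]))
    ([], [])
  -- second loop over y_g_list, appending colour-assigned tuples to green_list
  let final := p.2.foldl
    (fun (acc : List (Int × Char × String)) (ic : Int × Char) =>
      let i := ic.1
      let char := ic.2
      -- per-iteration recount of the already-assigned characters
      let secret_count : PySem.Dict Char Int := acc.foldl
        (fun d t => if d.contains t.2.1 then d.insert t.2.1 (d.getD t.2.1 0 + 1) else d.insert t.2.1 1)
        PySem.Dict.empty
      if s.contains char && secret_count.contains char then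
        let remaining : Int := (s.count char : Int) - secret_count.getD char 0
        if remaining == 0 then acc ++ [(i, char, "grey")]
        else if remaining < 0 then acc ++ [(i, char, "grey")]
        else acc ++ [(i, char, "yellow")]
      else if s.contains char && char != s.getD i.toNat ' ' then acc ++ [(i, char, "yellow")]
      else acc ++ [(i, char, "grey")])
    p.1
  -- positions in the list are pairwise distinct, so Python's lexicographic tuple
  -- sort coincides with the stable sort on the position key
  (PySem.List.sorted final (fun t => t.1)).map (fun t => (t.1, String.ofList [t.2.1], t.2.2))

-- ===== PORT B =====
def set_colors_alt (secret : String) (guess : String) : List (Int × String × String) :=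
  let s := secret.toList
  let g := guess.toList
  -- count secret's characters once
  let available : PySem.Dict Char Int :=
    s.foldl (fun d ch => d.insert ch (d.getD ch 0 + 1)) PySem.Dict.empty
  -- consume one copy per green position
  let available := (List.range g.length).foldl
    (fun (d : PySem.Dict Char Int) i =>
      if g.getD i ' ' == s.getD i ' ' then
        d.insert (g.getD i ' ') (d.getD (g.getD i ' ') 0 - 1)
      else d)
    available
  -- one left-to-right pass emitting the result in position order
  let r := (List.range g.length).foldl
    (fun (st : List (Int × Char × String) × PySem.Dict Char Int) i =>
      let ch := g.getD i ' '
      if ch == s.getD i ' ' then (st.1 ++ [((i : Int), ch, "green")], st.2)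
      else
        let a := st.2.getD ch 0
        (st.1 ++ [((i : Int), ch, if a > 0 then "yellow" else "grey")], st.2.insert ch (a - 1)))
    ([], available)
  r.1.map (fun t => (t.1, String.ofList [t.2.1], t.2.2))

-- ===== PRECONDITION & SPEC =====
-- Python A raises IndexError (secret[index]) iff len(guess) > len(secret); excluded.
def Pre_set_colors (secret : String) (guess : String) : Prop :=
  guess.toList.length ≤ secret.toList.length
instance (secret : String) (guess : String) : Decidable (Pre_set_colors secret guess) := by
  unfold Pre_set_colors; infer_instance
def pvWitness_set_colors : String × String := ("2+3=5", "2*4=8")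

def Spec_set_colors (secret : String) (guess : String) (out : List (Int × String × String)) : Prop := out = set_colors_alt secret guess
instance (secret : String) (guess : String) (out : List (Int × String × String)) : Decidable (Spec_set_colors secret guess out) := by unfold Spec_set_colors; infer_instance

-- ===== CLAIM (what is proved, stated in full; the proofs are below) =====
def Claim_equal_set_colors : Prop := ∀ (secret : String) (guess : String), Dom_set_colors secret guess → Pre_set_colors secret guess → Spec_set_colors secret guess (set_colors secret guess)

-- ===== LEMMAS AND PROOFS =====

-- the colour decision both programs make, as one left-to-right reference pass
def pvRef (s g : List Char) : List Nat → PySem.Dict Char Int → List (Int × Char × String)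
  | [], _ => []
  | i :: l, d =>
    let c := g.getD i ' '
    if c == s.getD i ' ' then ((i : Int), c, "green") :: pvRef s g l d
    else ((i : Int), c, if d.getD c 0 > 0 then "yellow" else "grey") ::
           pvRef s g l (d.insert c (d.getD c 0 - 1))

-- A's first loop produces the green triples and the non-green pairs, filtered from the index list
lemma pvA_phase1 (s g : List Char) (l : List Nat) (a1 : List (Int × Char × String)) (a2 : List (Int × Char)) :
    l.foldl
      (fun (st : List (Int × Char × String) × List (Int × Char)) index =>
        let g_current := g.getD index ' '
        let s_current := s.getD index ' '
        if g_current == s_current then (st.1 ++ [((index : Int), g_current, "green")], st.2)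
        else (st.1, st.2 ++ [((index : Int), g_current)]))
      (a1, a2)
    = (a1 ++ (l.filter (fun i => g.getD i ' ' == s.getD i ' ')).map
              (fun (i : Nat) => ((i : Int), g.getD i ' ', "green")),
       a2 ++ (l.filter (fun i => !(g.getD i ' ' == s.getD i ' '))).map
              (fun (i : Nat) => ((i : Int), g.getD i ' '))) := by
  induction l generalizing a1 a2 with
  | nil => simp
  | cons i l ih =>
    cases h : (g.getD i ' ' == s.getD i ' ') with
    | true =>
      simp only [List.foldl_cons, List.filter_cons, h, Bool.not_true, if_true,
        Bool.false_eq_true, ite_false, List.map_cons]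
      rw [ih]
      simp
    | false =>
      simp only [List.foldl_cons, List.filter_cons, h, Bool.not_false, if_true,
        Bool.false_eq_true, ite_false, List.map_cons]
      rw [ih]
      simp

-- B's phase-2 fold only decrements the counts of green characters
lemma pvB_phase2 (s g : List Char) (l : List Nat) (d : PySem.Dict Char Int) (c : Char) :
    (l.foldl
      (fun (d : PySem.Dict Char Int) i =>
        if g.getD i ' ' == s.getD i ' ' then
          d.insert (g.getD i ' ') (d.getD (g.getD i ' ') 0 - 1)
        else d)
      d).getD c 0
    = d.getD c 0 - (((l.filter (fun i => g.getD i ' ' == s.getD i ' ')).map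
                      (fun i => g.getD i ' ')).count c : Int) := by
  induction l generalizing d with
  | nil => simp
  | cons i l ih =>
    cases h : (g.getD i ' ' == s.getD i ' ') with
    | true =>
      simp only [List.foldl_cons, List.filter_cons, h, if_true, List.map_cons]
      rw [ih, PySem.Dict.getD_insert]
      by_cases hc : c = g.getD i ' '
      · subst hc
        simp
        ring
      · rw [if_neg hc, List.count_cons_of_ne (Ne.symm hc)]
    | false =>
      simp only [List.foldl_cons, List.filter_cons, h, Bool.false_eq_true, ite_false]
      exact ih d

-- B's emitting fold is the reference pass
lemma pvB_phase3 (s g : List Char) (l : List Nat) (res : List (Int × Char × String))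
    (d : PySem.Dict Char Int) :
    (l.foldl
      (fun (st : List (Int × Char × String) × PySem.Dict Char Int) i =>
        let ch := g.getD i ' '
        if ch == s.getD i ' ' then (st.1 ++ [((i : Int), ch, "green")], st.2)
        else
          let a := st.2.getD ch 0
          (st.1 ++ [((i : Int), ch, if a > 0 then "yellow" else "grey")], st.2.insert ch (a - 1)))
      (res, d)).1
    = res ++ pvRef s g l d := by
  induction l generalizing res d with
  | nil => simp [pvRef]
  | cons i l ih =>
    cases h : (g.getD i ' ' == s.getD i ' ') with
    | true =>
      simp only [pvRef, List.foldl_cons, h, if_true]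
      rw [ih]
      simp
    | false =>
      simp only [pvRef, List.foldl_cons, h, Bool.false_eq_true, ite_false]
      rw [ih]
      simp

-- the greens of the reference pass
lemma pvRef_greens (s g : List Char) (l : List Nat) (d : PySem.Dict Char Int) :
    (pvRef s g l d).filter (fun t => t.2.2 == "green")
    = (l.filter (fun i => g.getD i ' ' == s.getD i ' ')).map
        (fun (i : Nat) => ((i : Int), g.getD i ' ', "green")) := by
  induction l generalizing d with
  | nil => simp [pvRef]
  | cons i l ih =>
    cases h : (g.getD i ' ' == s.getD i ' ') with
    | true =>
      simp only [pvRef, List.filter_cons, h, if_true]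
      rw [ih]
      simp
    | false =>
      simp only [pvRef, List.filter_cons, h, Bool.false_eq_true, ite_false]
      rw [ih]
      simp
      split <;> decide

-- the positions of the reference pass
lemma pvRef_map_fst (s g : List Char) (l : List Nat) (d : PySem.Dict Char Int) :
    (pvRef s g l d).map (fun t => t.1) = l.map (fun (i : Nat) => (i : Int)) := by
  induction l generalizing d with
  | nil => simp [pvRef]
  | cons i l ih =>
    cases h : (g.getD i ' ' == s.getD i ' ') with
    | true =>
      simp only [pvRef, h, if_true, List.map_cons]
      rw [ih]
    | false =>
      simp only [pvRef, h, Bool.false_eq_true, ite_false, List.map_cons]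
      rw [ih]

-- A's per-iteration recount is the counter of the already-assigned characters
lemma pvCount (acc : List (Int × Char × String)) :
    acc.foldl
      (fun d t => if d.contains t.2.1 then d.insert t.2.1 (d.getD t.2.1 0 + 1) else d.insert t.2.1 1)
      PySem.Dict.empty
    = PySem.Dict.counter (acc.map (fun t => t.2.1)) := by
  rw [← PySem.Dict.foldl_insert_getD_add_one_eq_counter, List.foldl_map]
  congr 1
  funext d t
  by_cases hc : d.contains t.2.1 = true
  · simp [hc]
  · rw [if_neg (by simpa using hc),
        PySem.Dict.getD_of_not_contains d 0 (Bool.eq_false_iff.mpr hc)]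
    norm_num

-- A's second loop, started from any state whose character counts d mirrors,
-- appends exactly the non-green triples of the reference pass
lemma pvA_phase2 (s g : List Char) (l : List Nat) (acc : List (Int × Char × String))
    (d : PySem.Dict Char Int)
    (hd : ∀ c, d.getD c 0 = (s.count c : Int) - ((acc.map (fun t => t.2.1)).count c : Int)) :
    ((l.filter (fun i => !(g.getD i ' ' == s.getD i ' '))).map
        (fun (i : Nat) => ((i : Int), g.getD i ' '))).foldl
      (fun (acc : List (Int × Char × String)) (ic : Int × Char) =>
        let i := ic.1
        let char := ic.2
        let secret_count : PySem.Dict Char Int := acc.foldl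
          (fun d t => if d.contains t.2.1 then d.insert t.2.1 (d.getD t.2.1 0 + 1) else d.insert t.2.1 1)
          PySem.Dict.empty
        if s.contains char && secret_count.contains char then
          let remaining : Int := (s.count char : Int) - secret_count.getD char 0
          if remaining == 0 then acc ++ [(i, char, "grey")]
          else if remaining < 0 then acc ++ [(i, char, "grey")]
          else acc ++ [(i, char, "yellow")]
        else if s.contains char && char != s.getD i.toNat ' ' then acc ++ [(i, char, "yellow")]
        else acc ++ [(i, char, "grey")])
      acc
    = acc ++ (pvRef s g l d).filter (fun t => !(t.2.2 == "green")) := by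
  induction l generalizing acc d with
  | nil => simp [pvRef]
  | cons i l ih =>
    cases h : (g.getD i ' ' == s.getD i ' ') with
    | true =>
      simp only [List.filter_cons, h, Bool.not_true, Bool.false_eq_true, ite_false, pvRef,
        if_true]
      rw [ih acc d hd]
      simp
    | false =>
      simp only [List.filter_cons, h, Bool.not_false, if_true, List.map_cons, List.foldl_cons,
        pvRef, Bool.false_eq_true, ite_false]
      rw [pvCount acc, PySem.Dict.contains_counter, PySem.Dict.getD_counter,
          Int.toNat_natCast]
      -- the freshly appended tuple always extends the mirrored count by its character
      have hd' : ∀ col : String, ∀ c',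
          (d.insert (g.getD i ' ') (d.getD (g.getD i ' ') 0 - 1)).getD c' 0
          = (s.count c' : Int)
            - ((((acc ++ [((i : Int), g.getD i ' ', col)]).map (fun t => t.2.1)).count c') : Int) := by
        intro col c'
        rw [PySem.Dict.getD_insert, List.map_append, List.count_append]
        by_cases hcc : c' = g.getD i ' '
        · subst hcc
          rw [if_pos rfl, hd]
          simp
          ring
        · rw [if_neg hcc, hd]
          have h1 : List.count c' [g[i]?.getD ' '] = 0 :=
            List.count_eq_zero.mpr (by simpa using hcc)
          simp [h1]
      cases hs : s.contains (g.getD i ' ') with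
      | true =>
        cases hm : (List.map (fun t => t.2.1) acc).contains (g.getD i ' ') with
        | true =>
          -- character already assigned at least once: A compares the remaining count
          rw [if_pos (by rfl)]
          have hr : (List.count (g.getD i ' ') s : Int)
              - (List.count (g.getD i ' ') (List.map (fun t => t.2.1) acc) : Int)
              = d.getD (g.getD i ' ') 0 := (hd _).symm
          rw [hr]
          by_cases h0 : (0 : Int) < d.getD (g.getD i ' ') 0
          · rw [if_neg (by simpa using (by omega : ¬ d.getD (g.getD i ' ') 0 = 0)),
                if_neg (by omega : ¬ d.getD (g.getD i ' ') 0 < 0),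
                ih _ _ (hd' "yellow"), if_pos h0]
            simp
          · have hcol : (if (d.getD (g.getD i ' ') 0 == 0) = true then
                acc ++ [((i : Int), g.getD i ' ', "grey")]
              else if d.getD (g.getD i ' ') 0 < 0 then acc ++ [((i : Int), g.getD i ' ', "grey")]
              else acc ++ [((i : Int), g.getD i ' ', "yellow")])
              = acc ++ [((i : Int), g.getD i ' ', "grey")] := by
              by_cases hz : d.getD (g.getD i ' ') 0 = 0
              · rw [if_pos (by simpa using hz)]
              · rw [if_neg (by simpa using hz), if_pos (by omega)]
            rw [hcol, ih _ _ (hd' "grey"), if_neg h0]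
            simp
        | false =>
          -- first occurrence of a secret character: A's elif, B has a full count left
          rw [if_neg (by decide),
              if_pos (by simp only [bne, h]; decide),
              ih _ _ (hd' "yellow")]
          have h0 : (0 : Int) < d.getD (g.getD i ' ') 0 := by
            have hms : List.count (g.getD i ' ') (List.map (fun t => t.2.1) acc) = 0 := by
              simp only [List.contains_eq_mem, decide_eq_false_iff_not] at hm
              exact List.count_eq_zero.mpr hm
            have hsc : 0 < List.count (g.getD i ' ') s := by
              simp only [List.contains_eq_mem, decide_eq_true_eq] at hs
              exact List.count_pos_iff.mpr hs
            rw [hd _, hms]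
            omega
          rw [if_pos h0]
          simp
      | false =>
        -- character absent from secret: grey on both sides
        rw [if_neg (by simp), if_neg (by simp), ih _ _ (hd' "grey")]
        have h0 : ¬ (0 : Int) < d.getD (g.getD i ' ') 0 := by
          have hsc : List.count (g.getD i ' ') s = 0 := by
            simp only [List.contains_eq_mem, decide_eq_false_iff_not] at hs
            exact List.count_eq_zero.mpr hs
          rw [hd _, hsc]
          omega
        rw [if_neg h0]
        simp

-- ===== VERDICT (by name: the statement is the Claim_ definition above) =====
theorem set_colors_spec : Claim_equal_set_colors := by
  intro secret guess _ _
  unfold Spec_set_colors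
  show set_colors secret guess = set_colors_alt secret guess
  simp only [set_colors, set_colors_alt]
  rw [pvA_phase1, pvB_phase3]
  simp only [List.nil_append]
  have hd : ∀ c,
      ((List.range guess.toList.length).foldl
        (fun (d : PySem.Dict Char Int) i =>
          if guess.toList.getD i ' ' == secret.toList.getD i ' ' then
            d.insert (guess.toList.getD i ' ')
              (d.getD (guess.toList.getD i ' ') 0 - 1)
          else d)
        (secret.toList.foldl (fun d ch => d.insert ch (d.getD ch 0 + 1)) PySem.Dict.empty)).getD c 0
      = (secret.toList.count c : Int)
        - ((((List.range guess.toList.length).filter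
              (fun i => guess.toList.getD i ' ' == secret.toList.getD i ' ')).map
              (fun (i : Nat) => ((i : Int), guess.toList.getD i ' ', "green")) |>.map
                (fun t => t.2.1)).count c : Int) := by
    intro c
    rw [pvB_phase2, PySem.Dict.getD_foldl_insert_add_one, PySem.Dict.getD_empty,
        List.map_map]
    norm_num
    rfl
  rw [pvA_phase2 secret.toList guess.toList (List.range guess.toList.length) _ _ hd]
  congr 1
  apply PySem.List.sorted_eq_of_perm_of_pairwise_lt
  · -- the reference pass is a rearrangement of greens-then-non-greens
    have hp := (List.filter_append_perm (fun t : Int × Char × String => t.2.2 == "green")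
      (pvRef secret.toList guess.toList (List.range guess.toList.length)
        ((List.range guess.toList.length).foldl
          (fun (d : PySem.Dict Char Int) i =>
            if guess.toList.getD i ' ' == secret.toList.getD i ' ' then
              d.insert (guess.toList.getD i ' ')
                (d.getD (guess.toList.getD i ' ') 0 - 1)
            else d)
          (secret.toList.foldl (fun d ch => d.insert ch (d.getD ch 0 + 1))
            PySem.Dict.empty)))).symm
    rw [pvRef_greens] at hp
    exact hp
  · -- its positions are the strictly increasing 0,…,len(guess)-1
    have hf := pvRef_map_fst secret.toList guess.toList (List.range guess.toList.length)
      ((List.range guess.toList.length).foldl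
        (fun (d : PySem.Dict Char Int) i =>
          if guess.toList.getD i ' ' == secret.toList.getD i ' ' then
            d.insert (guess.toList.getD i ' ')
              (d.getD (guess.toList.getD i ' ') 0 - 1)
          else d)
        (secret.toList.foldl (fun d ch => d.insert ch (d.getD ch 0 + 1)) PySem.Dict.empty))
    have hpw : ((pvRef secret.toList guess.toList (List.range guess.toList.length)
        ((List.range guess.toList.length).foldl
        (fun (d : PySem.Dict Char Int) i =>
          if guess.toList.getD i ' ' == secret.toList.getD i ' ' then
            d.insert (guess.toList.getD i ' ')
              (d.getD (guess.toList.getD i ' ') 0 - 1)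
          else d)
        (secret.toList.foldl (fun d ch => d.insert ch (d.getD ch 0 + 1)) PySem.Dict.empty))).map
        (fun t => t.1)).Pairwise (· < ·) := by
      rw [hf]
      simpa [List.flatMap_singleton, List.flatMap_singleton', List.pairwise_map] using List.pairwise_lt_range (n := guess.toList.length)
    exact List.pairwise_map.mp hpw
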